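-- pv_equiv track=rewrite | github.com/ADL-genomics/BactiPipe | bactipipe/scripts/traits_amr.py | _norm_header_map
-- ===== SOURCE A (Python) =====
-- from typing import List, Dict, Optional
--
-- _AMR_HDR_NORMAL = {
--     "Contig id": ["Contig id", "ContigID", "Contig"],
--     "Start": ["Start"],
--     "Stop": ["Stop", "End"],
--     "Strand": ["Strand"],
--     "Element symbol": ["Element symbol", "Gene symbol", "Symbol"],
--     "Element name": ["Element name", "Gene name", "Name"],
--     "Scope": ["Scope"],
--     "Type": ["Type"],
--     "Subtype": ["Subtype"],
--     "Class": ["Class"],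
--     "Subclass": ["Subclass"],
--     "Method": ["Method"],
--     "Target length": ["Target length", "TargetLen"],
--     "Reference sequence length": ["Reference sequence length", "RefLen"],
--     "% Coverage of reference": ["% Coverage of reference", "Coverage", "PercCoverageOfReference"],
--     "% Identity to reference": ["% Identity to reference", "Identity", "PercIdentityToReference"],
--     "Alignment length": ["Alignment length", "AlignLen"],
--     "Closest reference accession": ["Closest reference accession", "RefAccession"],
--     "Closest reference name": ["Closest reference name", "RefName"],
--     "HMM accession": ["HMM accession", "HMMAccession"],
--     "HMM description": ["HMM description", "HMMDescription"],
-- }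
--
-- def _norm_header_map(headers: List[str]) -> Dict[str, str]:
--     hset = {h.strip(): h for h in headers}
--     res: Dict[str, str] = {}
--     for norm, variants in _AMR_HDR_NORMAL.items():
--         for v in variants:
--             if v in hset:
--                 res[norm] = hset[v]
--                 break
--     return res
-- ===== SOURCE B (Python) =====
-- from typing import List, Dict
--
-- # Flat reverse table: variant header -> (canonical name, variant priority).
-- _REV = {
--     'Contig id': ('Contig id', 0),
--     'ContigID': ('Contig id', 1),
--     'Contig': ('Contig id', 2),
--     'Start': ('Start', 0),
--     'Stop': ('Stop', 0),
--     'End': ('Stop', 1),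
--     'Strand': ('Strand', 0),
--     'Element symbol': ('Element symbol', 0),
--     'Gene symbol': ('Element symbol', 1),
--     'Symbol': ('Element symbol', 2),
--     'Element name': ('Element name', 0),
--     'Gene name': ('Element name', 1),
--     'Name': ('Element name', 2),
--     'Scope': ('Scope', 0),
--     'Type': ('Type', 0),
--     'Subtype': ('Subtype', 0),
--     'Class': ('Class', 0),
--     'Subclass': ('Subclass', 0),
--     'Method': ('Method', 0),
--     'Target length': ('Target length', 0),
--     'TargetLen': ('Target length', 1),
--     'Reference sequence length': ('Reference sequence length', 0),
--     'RefLen': ('Reference sequence length', 1),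
--     '% Coverage of reference': ('% Coverage of reference', 0),
--     'Coverage': ('% Coverage of reference', 1),
--     'PercCoverageOfReference': ('% Coverage of reference', 2),
--     '% Identity to reference': ('% Identity to reference', 0),
--     'Identity': ('% Identity to reference', 1),
--     'PercIdentityToReference': ('% Identity to reference', 2),
--     'Alignment length': ('Alignment length', 0),
--     'AlignLen': ('Alignment length', 1),
--     'Closest reference accession': ('Closest reference accession', 0),
--     'RefAccession': ('Closest reference accession', 1),
--     'Closest reference name': ('Closest reference name', 0),
--     'RefName': ('Closest reference name', 1),
--     'HMM accession': ('HMM accession', 0),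
--     'HMMAccession': ('HMM accession', 1),
--     'HMM description': ('HMM description', 0),
--     'HMMDescription': ('HMM description', 1),
-- }
--
-- # Output order of the canonical names.
-- _CANON = [
--     'Contig id',
--     'Start',
--     'Stop',
--     'Strand',
--     'Element symbol',
--     'Element name',
--     'Scope',
--     'Type',
--     'Subtype',
--     'Class',
--     'Subclass',
--     'Method',
--     'Target length',
--     'Reference sequence length',
--     '% Coverage of reference',
--     '% Identity to reference',
--     'Alignment length',
--     'Closest reference accession',
--     'Closest reference name',
--     'HMM accession',
--     'HMM description'
-- ]
--
-- def _norm_header_map(headers: List[str]) -> Dict[str, str]: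
--     # Single pass over the headers; per canonical name keep the original header whose
--     # stripped form is the best-priority (lowest-index) variant, later header wins ties.
--     best = {}
--     for h in headers:
--         hit = _REV.get(h.strip())
--         if hit is not None:
--             n, i = hit
--             cur = best.get(n)
--             if cur is None or i <= cur[0]:
--                 best[n] = (i, h)
--     return {n: best[n][1] for n in _CANON if n in best}
-- ===== Notes on version B (the rewrite author's own statement) =====
-- stated objective: alternative
-- what changed: B flattens the nested canonical->variants dict into a literal variant->(canonical,priority) reverse map, fills a best-priority dict in a single pass over the headers, and emits the result by a comprehension over a canonical-order list, instead of A's per-canonical probe of each variant against a stripped-header dict.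
import Mathlib
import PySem

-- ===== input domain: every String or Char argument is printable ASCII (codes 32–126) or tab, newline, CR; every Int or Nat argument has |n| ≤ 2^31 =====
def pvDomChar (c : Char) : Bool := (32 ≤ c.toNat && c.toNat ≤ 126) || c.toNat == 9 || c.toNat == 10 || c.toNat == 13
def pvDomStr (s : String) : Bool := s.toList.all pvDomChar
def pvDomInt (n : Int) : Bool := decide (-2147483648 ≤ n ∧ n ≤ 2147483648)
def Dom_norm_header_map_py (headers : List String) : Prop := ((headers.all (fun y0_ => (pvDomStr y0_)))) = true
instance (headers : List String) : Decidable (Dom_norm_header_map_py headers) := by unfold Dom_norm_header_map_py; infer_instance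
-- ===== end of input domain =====

-- B flattens the nested canonical->variants table into a literal variant->(canonical,priority)
-- reverse map, fills a best-priority dict in one pass over the headers, and emits the result
-- with a filterMap over the canonical-name order list (alternative data structure, same cost).

-- ===== PORT A =====
def hdrTable : List (String × List String) := [
  ("Contig id", ["Contig id", "ContigID", "Contig"]),
  ("Start", ["Start"]),
  ("Stop", ["Stop", "End"]),
  ("Strand", ["Strand"]),
  ("Element symbol", ["Element symbol", "Gene symbol", "Symbol"]),
  ("Element name", ["Element name", "Gene name", "Name"]),
  ("Scope", ["Scope"]),
  ("Type", ["Type"]),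
  ("Subtype", ["Subtype"]),
  ("Class", ["Class"]),
  ("Subclass", ["Subclass"]),
  ("Method", ["Method"]),
  ("Target length", ["Target length", "TargetLen"]),
  ("Reference sequence length", ["Reference sequence length", "RefLen"]),
  ("% Coverage of reference", ["% Coverage of reference", "Coverage", "PercCoverageOfReference"]),
  ("% Identity to reference", ["% Identity to reference", "Identity", "PercIdentityToReference"]),
  ("Alignment length", ["Alignment length", "AlignLen"]),
  ("Closest reference accession", ["Closest reference accession", "RefAccession"]),
  ("Closest reference name", ["Closest reference name", "RefName"]),
  ("HMM accession", ["HMM accession", "HMMAccession"]),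
  ("HMM description", ["HMM description", "HMMDescription"])]

def firstHit (hset : PySem.Dict String String) : List String → Option String
  | [] => none
  | v :: rest =>
    match hset.get? v with
    | some x => some x
    | none => firstHit hset rest

def norm_header_map_py (headers : List String) : List (String × String) :=
  let hset := headers.foldl (fun d h => d.insert (PySem.Str.strip h) h) PySem.Dict.empty
  (hdrTable.foldl (fun res nv =>
      match firstHit hset nv.2 with
      | some x => res.insert nv.1 x
      | none => res) PySem.Dict.empty).items

-- ===== PORT B =====
def revPairs : List (String × (String × Int)) := [
  ("Contig id", ("Contig id", 0)),
  ("ContigID", ("Contig id", 1)),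
  ("Contig", ("Contig id", 2)),
  ("Start", ("Start", 0)),
  ("Stop", ("Stop", 0)),
  ("End", ("Stop", 1)),
  ("Strand", ("Strand", 0)),
  ("Element symbol", ("Element symbol", 0)),
  ("Gene symbol", ("Element symbol", 1)),
  ("Symbol", ("Element symbol", 2)),
  ("Element name", ("Element name", 0)),
  ("Gene name", ("Element name", 1)),
  ("Name", ("Element name", 2)),
  ("Scope", ("Scope", 0)),
  ("Type", ("Type", 0)),
  ("Subtype", ("Subtype", 0)),
  ("Class", ("Class", 0)),
  ("Subclass", ("Subclass", 0)),
  ("Method", ("Method", 0)),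
  ("Target length", ("Target length", 0)),
  ("TargetLen", ("Target length", 1)),
  ("Reference sequence length", ("Reference sequence length", 0)),
  ("RefLen", ("Reference sequence length", 1)),
  ("% Coverage of reference", ("% Coverage of reference", 0)),
  ("Coverage", ("% Coverage of reference", 1)),
  ("PercCoverageOfReference", ("% Coverage of reference", 2)),
  ("% Identity to reference", ("% Identity to reference", 0)),
  ("Identity", ("% Identity to reference", 1)),
  ("PercIdentityToReference", ("% Identity to reference", 2)),
  ("Alignment length", ("Alignment length", 0)),
  ("AlignLen", ("Alignment length", 1)),
  ("Closest reference accession", ("Closest reference accession", 0)),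
  ("RefAccession", ("Closest reference accession", 1)),
  ("Closest reference name", ("Closest reference name", 0)),
  ("RefName", ("Closest reference name", 1)),
  ("HMM accession", ("HMM accession", 0)),
  ("HMMAccession", ("HMM accession", 1)),
  ("HMM description", ("HMM description", 0)),
  ("HMMDescription", ("HMM description", 1))]

def canonList : List String := ["Contig id", "Start", "Stop", "Strand", "Element symbol", "Element name", "Scope", "Type", "Subtype", "Class", "Subclass", "Method", "Target length", "Reference sequence length", "% Coverage of reference", "% Identity to reference", "Alignment length", "Closest reference accession", "Closest reference name", "HMM accession", "HMM description"]

-- _REV as a dict (Source B's module-level literal dict)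
def revIndex : PySem.Dict String (String × Int) :=
  revPairs.foldl (fun d kv => d.insert kv.1 kv.2) PySem.Dict.empty

-- body of B's header loop
def bstep (b : PySem.Dict String (Int × String)) (h : String) : PySem.Dict String (Int × String) :=
  match revIndex.get? (PySem.Str.strip h) with
  | none => b
  | some ni =>
    match b.get? ni.1 with
    | none => b.insert ni.1 (ni.2, h)
    | some jx => if ni.2 ≤ jx.1 then b.insert ni.1 (ni.2, h) else b

def norm_header_map_py_alt (headers : List String) : List (String × String) :=
  let best := headers.foldl bstep PySem.Dict.empty
  canonList.filterMap (fun n => (best.get? n).map (fun p => (n, p.2)))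

-- ===== PRECONDITION & SPEC =====
def Spec_norm_header_map_py (headers : List String) (out : List (String × String)) : Prop := out = norm_header_map_py_alt headers
instance (headers : List String) (out : List (String × String)) : Decidable (Spec_norm_header_map_py headers out) := by unfold Spec_norm_header_map_py; infer_instance

-- ===== CLAIM (what is proved, stated in full; the proofs are below) =====
def Claim_equal_norm_header_map_py : Prop := ∀ (headers : List String), Dom_norm_header_map_py headers → Spec_norm_header_map_py headers (norm_header_map_py headers)

-- ===== LEMMAS AND PROOFS =====
-- the last header (if any) whose stripped form equals v
def lastMatch (hs : List String) (v : String) : Option String :=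
  hs.foldl (fun o h => if PySem.Str.strip h = v then some h else o) none

-- first variant (from index i on) on which the lookup f hits, with its index
def fhAux (f : String → Option String) : List String → Int → Option (Int × String)
  | [], _ => none
  | v :: r, i =>
    match f v with
    | some x => some (i, x)
    | none => fhAux f r (i + 1)

lemma hset_get (hs : List String) (d : PySem.Dict String String) (k : String) :
    (hs.foldl (fun d h => d.insert (PySem.Str.strip h) h) d).get? k =
      hs.foldl (fun o h => if PySem.Str.strip h = k then some h else o) (d.get? k) := by
  induction hs generalizing d with
  | nil => rfl
  | cons h t ih =>
    simp only [List.foldl_cons]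
    rw [ih]
    congr 1
    rw [PySem.Dict.get?_insert]
    by_cases hk : PySem.Str.strip h = k
    · simp [hk]
    · simp [hk, Ne.symm hk]

lemma fhAux_congr (f g : String → Option String) (vs : List String) (i : Int)
    (h : ∀ v ∈ vs, f v = g v) : fhAux f vs i = fhAux g vs i := by
  induction vs generalizing i with
  | nil => rfl
  | cons v r ih =>
    simp only [fhAux]
    rw [h v (List.mem_cons_self ..)]
    cases g v with
    | some x => rfl
    | none => exact ih _ (fun w hw => h w (List.mem_cons_of_mem _ hw))

lemma fhAux_ge (f : String → Option String) (vs : List String) (i : Int) (jx : Int × String)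
    (h : fhAux f vs i = some jx) : i ≤ jx.1 := by
  induction vs generalizing i with
  | nil => simp [fhAux] at h
  | cons v r ih =>
    simp only [fhAux] at h
    cases hv : f v with
    | some x => rw [hv] at h; injection h with h; subst h; exact le_refl _
    | none => rw [hv] at h; have := ih _ h; omega

lemma firstHit_eq_fhAux (hset : PySem.Dict String String) (f : String → Option String)
    (vs : List String) (i : Int) (h : ∀ v ∈ vs, hset.get? v = f v) :
    firstHit hset vs = (fhAux f vs i).map (·.2) := by
  induction vs generalizing i with
  | nil => rfl
  | cons v r ih =>
    simp only [firstHit, fhAux]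
    rw [h v (List.mem_cons_self ..)]
    cases f v with
    | some x => rfl
    | none => exact ih _ (fun w hw => h w (List.mem_cons_of_mem _ hw))

lemma fhAux_update (f : String → Option String) (vs : List String) (hnd : vs.Nodup)
    (k x : String) (i₀ s : Int) (hmem : (i₀, k) ∈ PySem.List.enumerate vs s) :
    fhAux (fun v => if k = v then some x else f v) vs s =
      match fhAux f vs s with
      | none => some (i₀, x)
      | some jx => if i₀ ≤ jx.1 then some (i₀, x) else some jx := by
  induction vs generalizing s with
  | nil => simp [PySem.List.enumerate] at hmem
  | cons v r ih =>
    rw [PySem.List.enumerate_cons] at hmem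
    rcases List.mem_cons.1 hmem with heq | htl
    · -- k = v at index s
      have hi : s = i₀ := (congrArg Prod.fst heq).symm
      have hk : v = k := (congrArg Prod.snd heq).symm
      subst hi; subst hk
      simp only [fhAux, if_true]
      cases hv : f v with
      | some y => simp
      | none =>
        cases hr : fhAux f r (s + 1) with
        | none => simp
        | some jx =>
          have := fhAux_ge f r (s + 1) jx hr
          simp [show s ≤ jx.1 from by omega]
    · -- k occurs in the tail
      have hkr : k ∈ r := by
        obtain ⟨j, hj, hp⟩ := (PySem.List.mem_enumerate_iff _ _ _).1 htl
        have : k = r[j] := congrArg Prod.snd hp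
        subst this; exact List.getElem_mem hj
      have hvk : ¬ (k = v) := by
        intro hh; subst hh; exact (List.nodup_cons.1 hnd).1 hkr
      simp only [fhAux, if_neg hvk]
      cases hv : f v with
      | some y =>
        have hge : s + 1 ≤ i₀ := by
          obtain ⟨j, hj, hp⟩ := (PySem.List.mem_enumerate_iff _ _ _).1 htl
          have : i₀ = s + 1 + (j : Int) := congrArg Prod.fst hp
          omega
        simp [show ¬ i₀ ≤ s from by omega]
      | none => exact ih (List.nodup_cons.1 hnd).2 _ htl

lemma fhAux_none (vs : List String) (i : Int) : fhAux (fun _ => none) vs i = none := by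
  induction vs generalizing i with
  | nil => rfl
  | cons v r ih => simp [fhAux, ih]

lemma bstep_none (b : PySem.Dict String (Int × String)) (h : String)
    (hrev : revIndex.get? (PySem.Str.strip h) = none) : bstep b h = b := by
  unfold bstep; rw [hrev]

lemma bstep_some (b : PySem.Dict String (Int × String)) (h : String) (ni : String × Int)
    (hrev : revIndex.get? (PySem.Str.strip h) = some ni) :
    bstep b h = match b.get? ni.1 with
      | none => b.insert ni.1 (ni.2, h)
      | some jx => if ni.2 ≤ jx.1 then b.insert ni.1 (ni.2, h) else b := by
  unfold bstep; rw [hrev]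

lemma rowEq (n : String) (vs : List String) (hnd : vs.Nodup)
    (H : ∀ k i, revIndex.get? k = some (n, i) ↔ (i, k) ∈ PySem.List.enumerate vs 0) :
    ∀ hs : List String, (hs.foldl bstep PySem.Dict.empty).get? n = fhAux (lastMatch hs) vs 0 := by
  have hmemrev : ∀ v ∈ vs, ∃ i : Int, revIndex.get? v = some (n, i) := by
    intro v hv
    obtain ⟨j, hj, hvj⟩ := List.mem_iff_getElem.1 hv
    refine ⟨(j : Int), (H v (j : Int)).2 ?_⟩
    exact (PySem.List.mem_enumerate_iff _ _ _).2 ⟨j, hj, by simp [hvj]⟩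
  intro hs
  induction hs using List.reverseRecOn with
  | nil => exact (fhAux_none vs 0).symm
  | append_singleton t h ih =>
    rw [List.foldl_append, List.foldl_cons, List.foldl_nil]
    have hlm : ∀ v, lastMatch (t ++ [h]) v =
        if PySem.Str.strip h = v then some h else lastMatch t v := by
      intro v; simp [lastMatch, List.foldl_append]
    cases hrev : revIndex.get? (PySem.Str.strip h) with
    | none =>
      rw [bstep_none _ _ hrev, ih]
      refine (fhAux_congr _ _ _ _ (fun v hv => ?_)).symm
      rw [hlm v]
      have : ¬ (PySem.Str.strip h = v) := by
        intro he; subst he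
        obtain ⟨i, hi⟩ := hmemrev _ hv
        rw [hrev] at hi; simp at hi
      rw [if_neg this]
    | some ni =>
      rw [bstep_some _ _ _ hrev]
      by_cases hn : ni.1 = n
      · -- hit on our canonical name
        subst hn
        have hrev' : revIndex.get? (PySem.Str.strip h) = some (ni.1, ni.2) := by rw [hrev]
        have hin : (ni.2, PySem.Str.strip h) ∈ PySem.List.enumerate vs 0 :=
          (H _ _).1 hrev'
        have hupd := fhAux_update (lastMatch t) vs hnd (PySem.Str.strip h) h ni.2 0 hin
        have hfun : fhAux (lastMatch (t ++ [h])) vs 0 =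
            fhAux (fun v => if PySem.Str.strip h = v then some h else lastMatch t v) vs 0 :=
          fhAux_congr _ _ _ _ (fun v _ => hlm v)
        rw [hfun, hupd, ← ih]
        cases hb : ((t.foldl bstep PySem.Dict.empty).get? ni.1) with
        | none => simp [PySem.Dict.get?_insert_self]
        | some jx =>
          by_cases hle : ni.2 ≤ jx.1
          · simp [hle, PySem.Dict.get?_insert_self]
          · simp [hle, hb]
      · -- hit on another canonical name: our entry and fhAux are unchanged
        have hnot : ¬ (PySem.Str.strip h ∈ vs) := by
          intro hv
          obtain ⟨i, hi⟩ := hmemrev _ hv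
          rw [hrev] at hi
          exact hn (congrArg Prod.fst (Option.some.inj hi))
        have hrhs : fhAux (lastMatch (t ++ [h])) vs 0 = fhAux (lastMatch t) vs 0 := by
          refine fhAux_congr _ _ _ _ (fun v hv => ?_)
          have hne : ¬ (PySem.Str.strip h = v) := fun he => hnot (by rw [he]; exact hv)
          rw [hlm v, if_neg hne]
        rw [hrhs, ← ih]
        cases hb : ((t.foldl bstep PySem.Dict.empty).get? ni.1) with
        | none => rw [PySem.Dict.get?_insert_of_ne _ _ (fun he => hn he.symm)]
        | some jx =>
          by_cases hle : ni.2 ≤ jx.1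
          · simp [hle, PySem.Dict.get?_insert_of_ne _ _ (fun he => hn he.symm)]
          · simp [hle]

set_option maxRecDepth 8192 in
lemma rev_items : revIndex.items = revPairs := by rfl

set_option maxRecDepth 8192 in
lemma rev_keys_nodup : revIndex.keys.Nodup := by decide

lemma Hall : ∀ nv ∈ hdrTable, nv.2.Nodup ∧
    ∀ k i, revIndex.get? k = some (nv.1, i) ↔ (i, k) ∈ PySem.List.enumerate nv.2 0 := by
  intro nv hmem
  fin_cases hmem <;>
  · refine ⟨by decide, fun k i => ?_⟩
    rw [PySem.Dict.get?_eq_some_iff_mem_items _ _ _ rev_keys_nodup, rev_items]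
    simp [revPairs, PySem.List.enumerate]
    tauto

-- A's optional-insert fold over fresh distinct keys lists its hits in table order
lemma items_fold_opt (g : String × List String → Option String)
    (l : List (String × List String)) (d : PySem.Dict String String)
    (hnd : (l.map Prod.fst).Nodup) (hfresh : ∀ nv ∈ l, d.contains nv.1 = false) :
    (l.foldl (fun res nv => match g nv with
      | some x => res.insert nv.1 x
      | none => res) d).items
    = d.items ++ l.filterMap (fun nv => (g nv).map (fun x => (nv.1, x))) := by
  induction l generalizing d with
  | nil => simp
  | cons nv t ih =>
    simp only [List.map_cons, List.nodup_cons] at hnd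
    have hfr := hfresh nv (List.mem_cons_self ..)
    have htl : ∀ w ∈ t, w.1 ≠ nv.1 := by
      intro w hw he
      exact hnd.1 (he ▸ List.mem_map_of_mem hw)
    simp only [List.foldl_cons, List.filterMap_cons]
    cases hg : g nv with
    | none =>
      rw [ih _ hnd.2 (fun w hw => hfresh w (List.mem_cons_of_mem _ hw))]
      simp
    | some x =>
      rw [ih _ hnd.2 ?_]
      · rw [PySem.Dict.items_insert, hfr]
        simp
      · intro w hw
        rw [PySem.Dict.contains_insert]
        have : (w.1 == nv.1) = false := by
          simpa using htl w hw
        rw [this, hfresh w (List.mem_cons_of_mem _ hw)]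
        rfl

lemma canon_eq : canonList = hdrTable.map Prod.fst := by rfl

lemma hdr_keys_nodup : (hdrTable.map Prod.fst).Nodup := by decide

-- ===== VERDICT (by name: the statement is the Claim_ definition above) =====
theorem norm_header_map_py_spec : Claim_equal_norm_header_map_py := by
  intro headers _
  unfold Spec_norm_header_map_py
  simp only [norm_header_map_py, norm_header_map_py_alt]
  rw [items_fold_opt _ _ _ hdr_keys_nodup (fun _ _ => rfl), canon_eq, List.filterMap_map]
  rw [show (PySem.Dict.empty : PySem.Dict String String).items = [] from rfl, List.nil_append]
  refine (List.filterMap_congr (fun nv hmem => ?_)).symm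
  obtain ⟨hnd, H⟩ := Hall nv hmem
  have hrow := rowEq nv.1 nv.2 hnd H headers
  have hfh : firstHit (headers.foldl (fun d h => d.insert (PySem.Str.strip h) h) PySem.Dict.empty) nv.2
      = (fhAux (lastMatch headers) nv.2 0).map (·.2) := by
    refine firstHit_eq_fhAux _ _ _ 0 (fun v hv => ?_)
    rw [hset_get]
    rfl
  simp only [Function.comp]
  rw [hrow, hfh]
  cases hb : fhAux (lastMatch headers) nv.2 0 <;> rfl
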